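-- pv_equiv track=rewrite | github.com/Claudio-Me/Path-Boosting-Public | main.py | count_repeated_rows
-- ===== SOURCE A (Python) =====
-- def count_repeated_rows(matrix):
--     # Create a set to store the rows that have already been seen
--     seen_rows = set()
--
--     # Initialize a counter for the number of repeated rows
--     repeated_rows = 0
--
--     # Iterate through the rows of the matrix
--     for row in matrix:
--         # If the row has already been seen, increment the counter
--         if tuple(row) in seen_rows:
--             repeated_rows += 1
--         # Otherwise, add the row to the set of seen rows
--         else:
--             seen_rows.add(tuple(row))
--
--     return repeated_rows
-- ===== SOURCE B (Python) =====
-- def count_repeated_rows(matrix):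
--     # Group-elimination: repeatedly take the first remaining row, count its
--     # copies among the rest (each copy is a repeat), then drop the whole group.
--     rows = [tuple(r) for r in matrix]
--     total = 0
--     while rows:
--         head, rest = rows[0], rows[1:]
--         total += rest.count(head)
--         rows = [r for r in rest if r != head]
--     return total
-- ===== Notes on version B (the rewrite author's own statement) =====
-- stated objective: alternative
-- what changed: Replaces the hash-set membership loop by group elimination without any set: repeatedly take the first remaining row, add the number of its copies in the rest (rest.count), and filter that whole group out before continuing.
import Mathlib
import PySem

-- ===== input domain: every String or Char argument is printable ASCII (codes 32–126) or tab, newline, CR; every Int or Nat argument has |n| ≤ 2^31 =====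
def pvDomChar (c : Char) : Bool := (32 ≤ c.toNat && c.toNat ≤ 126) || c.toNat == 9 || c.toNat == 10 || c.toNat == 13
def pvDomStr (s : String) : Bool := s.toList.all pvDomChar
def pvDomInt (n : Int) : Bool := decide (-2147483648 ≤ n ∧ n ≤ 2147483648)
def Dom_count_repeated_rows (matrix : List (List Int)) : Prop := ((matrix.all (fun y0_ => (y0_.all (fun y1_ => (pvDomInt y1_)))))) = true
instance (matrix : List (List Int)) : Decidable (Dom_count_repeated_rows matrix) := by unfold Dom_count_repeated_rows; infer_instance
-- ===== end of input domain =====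

-- B replaces A's seen-set loop by set-free group elimination: take the first remaining
-- row, count its copies in the rest, filter the group out, repeat (objective: alternative).

-- ===== PORT A =====
-- A's loop: state = (seen_rows, repeated_rows); membership branch as in the Python.
def count_repeated_rows (matrix : List (List Int)) : Int :=
  (matrix.foldl
    (fun (st : PySem.Set (List Int) × Int) row =>
      if PySem.Set.contains st.1 row then (st.1, st.2 + 1) else (PySem.Set.add st.1 row, st.2))
    (PySem.Set.empty, 0)).2

-- ===== PORT B =====
-- B's while loop: state = (rows, total); one iteration = count head's copies in the rest,
-- then filter out the whole group.  Terminates because the row list strictly shrinks.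
def count_repeated_rows_alt_go (rows : List (List Int)) (total : Int) : Int :=
  match rows with
  | [] => total
  | head :: rest =>
      count_repeated_rows_alt_go (rest.filter (fun r => r ≠ head))
        (total + (PySem.List.count rest head : Int))
termination_by rows.length
decreasing_by
  simpa using Nat.lt_succ_of_le ((List.length_filter_le _ _).trans (Nat.le_of_eq (by simp)))

def count_repeated_rows_alt (matrix : List (List Int)) : Int :=
  count_repeated_rows_alt_go matrix 0

-- ===== PRECONDITION & SPEC =====
def Spec_count_repeated_rows (matrix : List (List Int)) (out : Int) : Prop := out = count_repeated_rows_alt matrix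
instance (matrix : List (List Int)) (out : Int) : Decidable (Spec_count_repeated_rows matrix out) := by unfold Spec_count_repeated_rows; infer_instance

-- ===== CLAIM (what is proved, stated in full; the proofs are below) =====
def Claim_equal_count_repeated_rows : Prop := ∀ (matrix : List (List Int)), Dom_count_repeated_rows matrix → Spec_count_repeated_rows matrix (count_repeated_rows matrix)

-- ===== LEMMAS AND PROOFS =====

-- A-side loop invariant: counter plus size of the seen set is constant.
theorem count_repeated_rows_loop (rs : List (List Int)) :
    ∀ (seen : PySem.Set (List Int)) (c : Int),
      (rs.foldl
        (fun (st : PySem.Set (List Int) × Int) row =>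
          if PySem.Set.contains st.1 row then (st.1, st.2 + 1) else (PySem.Set.add st.1 row, st.2))
        (seen, c)).2
      + ((rs.foldl PySem.Set.add seen).length : Int)
      = c + (rs.length : Int) + (seen.length : Int) := by
  induction rs with
  | nil => intro seen c; simp
  | cons r rs ih =>
    intro seen c
    by_cases h : r ∈ seen
    · have hc : PySem.Set.contains seen r = true := by
        simpa [PySem.Set.contains] using h
      have hadd : PySem.Set.add seen r = seen := PySem.Set.add_of_mem h
      simp only [List.foldl_cons, hc, if_true, hadd, List.length_cons]
      have := ih seen (c + 1)
      push_cast at this ⊢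
      omega
    · have hc : PySem.Set.contains seen r = false := by
        simpa [PySem.Set.contains] using h
      have hadd : PySem.Set.add seen r = seen ++ [r] := PySem.Set.add_of_not_mem h
      simp only [List.foldl_cons, hc, Bool.false_eq_true, if_false, hadd, List.length_cons]
      have := ih (seen ++ [r]) c
      simp only [List.length_append, List.length_cons, List.length_nil] at this
      push_cast at this ⊢
      omega

-- Distinct count of h :: t is one more than that of t with h's copies removed.
theorem ofList_cons_length (h : List Int) (t : List (List Int)) :
    (PySem.Set.ofList (h :: t)).length
      = 1 + (PySem.Set.ofList (t.filter (fun r => r ≠ h))).length := by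
  have hperm : List.Perm (PySem.Set.ofList (h :: t)) (h :: PySem.Set.ofList (t.filter (fun r => r ≠ h))) := by
    rw [List.perm_ext_iff_of_nodup (PySem.Set.nodup_ofList _)]
    · intro x
      simp only [PySem.Set.mem_ofList, List.mem_cons, List.mem_filter, decide_eq_true_eq]
      constructor
      · rintro (rfl | hx)
        · exact Or.inl rfl
        · by_cases hxh : x = h
          · exact Or.inl hxh
          · exact Or.inr ⟨hx, hxh⟩
      · rintro (rfl | ⟨hx, _⟩)
        · exact Or.inl rfl
        · exact Or.inr hx
    · refine List.Nodup.cons ?_ (PySem.Set.nodup_ofList _)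
      intro hmem
      have := (PySem.Set.mem_ofList _ _).1 hmem
      simp at this
  have := hperm.length_eq
  simp only [List.length_cons] at this
  omega

-- removing v's copies and counting them partitions a list.
theorem filter_ne_length_add_count (v : List Int) (l : List (List Int)) :
    (l.filter (fun r => r ≠ v)).length + l.count v = l.length := by
  induction l with
  | nil => simp
  | cons a t ih =>
    simp only [ne_eq, decide_not] at ih ⊢
    by_cases h : a = v <;> simp [h] <;> omega

-- set(l) has at most as many elements as l.
theorem set_foldl_add_length_le (l : List (List Int)) :
    ∀ seen : PySem.Set (List Int), (l.foldl PySem.Set.add seen).length ≤ seen.length + l.length := by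
  induction l with
  | nil => intro seen; simp
  | cons h t ih =>
    intro seen
    by_cases hm : h ∈ seen
    · have := ih (PySem.Set.add seen h)
      rw [PySem.Set.add_of_mem hm] at this
      simp only [List.foldl_cons, PySem.Set.add_of_mem hm, List.length_cons]
      omega
    · have := ih (seen ++ [h])
      simp only [List.foldl_cons, PySem.Set.add_of_not_mem hm, List.length_append,
        List.length_cons, List.length_nil] at this ⊢
      omega

theorem ofList_length_le (l : List (List Int)) :
    (PySem.Set.ofList l).length ≤ l.length := by
  have := set_foldl_add_length_le l PySem.Set.empty
  simpa [PySem.Set.ofList_eq_foldl, PySem.Set.empty] using this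

-- B's loop computes total + (rows consumed) - (distinct rows consumed).
theorem count_repeated_rows_alt_go_le (n : Nat) :
    ∀ (rows : List (List Int)) (total : Int), rows.length ≤ n →
      count_repeated_rows_alt_go rows total
        = total + (rows.length : Int) - ((PySem.Set.ofList rows).length : Int) := by
  induction n with
  | zero =>
    intro rows total hlen
    have : rows = [] := List.eq_nil_of_length_eq_zero (Nat.le_zero.mp hlen)
    subst this
    simp [count_repeated_rows_alt_go, PySem.Set.ofList]
  | succ n ih =>
    intro rows total hlen
    match rows with
    | [] => simp [count_repeated_rows_alt_go, PySem.Set.ofList]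
    | head :: rest =>
      have hfl : (rest.filter (fun r => r ≠ head)).length ≤ n := by
        have := List.length_filter_le (fun r => decide (r ≠ head)) rest
        simp only [List.length_cons] at hlen
        omega
      rw [count_repeated_rows_alt_go, ih _ _ hfl, ofList_cons_length]
      have hcnt : PySem.List.count rest head = rest.count head := PySem.List.count_eq rest head
      have hsplit : (rest.filter (fun r => r ≠ head)).length + rest.count head = rest.length :=
        filter_ne_length_add_count head rest
      have hle : ((PySem.Set.ofList (rest.filter (fun r => r ≠ head))).length : Int)
          ≤ ((rest.filter (fun r => r ≠ head)).length : Int) := by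
        exact_mod_cast ofList_length_le _
      simp only [List.length_cons]
      push_cast
      omega

theorem count_repeated_rows_alt_go_eq (rows : List (List Int)) (total : Int) :
    count_repeated_rows_alt_go rows total
      = total + (rows.length : Int) - ((PySem.Set.ofList rows).length : Int) :=
  count_repeated_rows_alt_go_le rows.length rows total (Nat.le_refl _)

-- ===== VERDICT (by name: the statement is the Claim_ definition above) =====
theorem count_repeated_rows_spec : Claim_equal_count_repeated_rows := by
  intro matrix _
  unfold Spec_count_repeated_rows count_repeated_rows count_repeated_rows_alt
  have h := count_repeated_rows_loop matrix PySem.Set.empty 0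
  have hB := count_repeated_rows_alt_go_eq matrix 0
  rw [hB]
  have hofl : PySem.Set.ofList matrix = matrix.foldl PySem.Set.add PySem.Set.empty :=
    PySem.Set.ofList_eq_foldl matrix
  rw [hofl] at *
  simp only [PySem.Set.empty, List.length_nil] at h ⊢
  push_cast at h
  omega
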